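-- pv_equiv track=rewrite | github.com/tngsk/markdown-to-html | test_perf_replace.py | has_interactive_components_any
-- ===== SOURCE A (Python) =====
-- def has_interactive_components_any(html_body):
--     return any(
--         tag in html_body
--         for tag in [
--             "<mono-poll",
--             "<mono-ab-test",
--             "<mono-notebook",
--             "<mono-textfield-input",
--             "<mono-reaction",
--             "<mono-session-join",
--             "<mono-group-assignment",
--         ]
--     )
-- ===== SOURCE B (Python) =====
-- def has_interactive_components_any(html_body):
--     SUFFIXES = ("poll", "ab-test", "notebook", "textfield-input",
--                 "reaction", "session-join", "group-assignment")
--     s = html_body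
--     while s:
--         if s.startswith("<mono-") and s[6:].startswith(SUFFIXES):
--             return True
--         s = s[1:]
--     return False
-- ===== Notes on version B (the rewrite author's own statement) =====
-- stated objective: alternative
-- what changed: Replaces seven independent whole-string substring scans with a single left-to-right sweep that at each position checks the shared six-character tag prefix once and then the seven short tag suffixes.
import Mathlib
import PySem

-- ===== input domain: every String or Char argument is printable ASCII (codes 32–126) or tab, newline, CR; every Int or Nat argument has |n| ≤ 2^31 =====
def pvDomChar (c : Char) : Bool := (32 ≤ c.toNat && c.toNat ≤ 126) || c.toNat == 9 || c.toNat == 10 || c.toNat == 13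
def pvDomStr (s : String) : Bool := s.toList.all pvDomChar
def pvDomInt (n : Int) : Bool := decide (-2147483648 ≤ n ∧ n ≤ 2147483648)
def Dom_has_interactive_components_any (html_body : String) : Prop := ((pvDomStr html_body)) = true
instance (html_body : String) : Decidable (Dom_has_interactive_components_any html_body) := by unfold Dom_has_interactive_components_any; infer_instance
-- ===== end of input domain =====

-- B replaces seven whole-string substring scans with one left-to-right sweep checking the shared
-- '<mono-' prefix once per position (alternative decomposition, same observable result).

-- ===== PORT A =====
-- any(tag in html_body for tag in [...])
def has_interactive_components_any (html_body : String) : Bool :=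
  ([ "<mono-poll", "<mono-ab-test", "<mono-notebook", "<mono-textfield-input",
     "<mono-reaction", "<mono-session-join", "<mono-group-assignment" ] : List String).any
    (fun tag => PySem.Str.isIn tag html_body)

-- ===== PORT B =====
-- the SUFFIXES tuple of Source B
def pvSuffixes : List (List Char) :=
  [ "poll".toList, "ab-test".toList, "notebook".toList, "textfield-input".toList,
    "reaction".toList, "session-join".toList, "group-assignment".toList ]

-- the loop body's test: s.startswith("<mono-") and s[6:].startswith(SUFFIXES)
-- (s[6:] with a nonnegative literal start is exactly List.drop 6)
def pvHit (s : List Char) : Bool :=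
  PySem.Chars.startswith s "<mono-".toList &&
    pvSuffixes.any (fun suf => PySem.Chars.startswith (s.drop 6) suf)

-- the 'while s: … ; s = s[1:]' loop
def pvScan : List Char → Bool
  | [] => false
  | c :: rest => pvHit (c :: rest) || pvScan rest

def has_interactive_components_any_alt (html_body : String) : Bool :=
  pvScan html_body.toList

-- ===== PRECONDITION & SPEC =====
def Spec_has_interactive_components_any (html_body : String) (out : Bool) : Prop := out = has_interactive_components_any_alt html_body
instance (html_body : String) (out : Bool) : Decidable (Spec_has_interactive_components_any html_body out) := by unfold Spec_has_interactive_components_any; infer_instance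

-- ===== CLAIM (what is proved, stated in full; the proofs are below) =====
def Claim_equal_has_interactive_components_any : Prop := ∀ (html_body : String), Dom_has_interactive_components_any html_body → Spec_has_interactive_components_any html_body (has_interactive_components_any html_body)

-- ===== LEMMAS AND PROOFS =====

theorem pv_prefix_append_iff (a b l : List Char) :
    (a ++ b) <+: l ↔ a <+: l ∧ b <+: l.drop a.length := by
  constructor
  · rintro ⟨t, rfl⟩
    refine ⟨⟨b ++ t, by simp⟩, ?_⟩
    simp
  · rintro ⟨⟨t, rfl⟩, hb⟩
    simp only [List.drop_left] at hb
    obtain ⟨u, rfl⟩ := hb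
    exact ⟨u, by simp⟩

theorem pv_hit_iff (l : List Char) :
    pvHit l = true ↔ ∃ suf ∈ pvSuffixes, ("<mono-".toList ++ suf) <+: l := by
  have h6 : ("<mono-".toList : List Char).length = 6 := by decide
  simp only [pvHit, Bool.and_eq_true, List.any_eq_true, PySem.Chars.startswith_iff]
  constructor
  · rintro ⟨hm, suf, hsuf, hs⟩
    exact ⟨suf, hsuf, (pv_prefix_append_iff _ _ _).2 ⟨hm, by rw [h6]; exact hs⟩⟩
  · rintro ⟨suf, hsuf, h⟩
    obtain ⟨hm, hs⟩ := (pv_prefix_append_iff _ _ _).1 h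
    exact ⟨hm, suf, hsuf, by rw [h6] at hs; exact hs⟩

theorem pv_scan_iff (l : List Char) :
    pvScan l = true ↔ ∃ j, pvHit (l.drop j) = true := by
  induction l with
  | nil =>
    simp only [pvScan]
    constructor
    · intro h; cases h
    · rintro ⟨j, h⟩; simp only [List.drop_nil] at h; exact absurd h (by decide)
  | cons c rest ih =>
    simp only [pvScan, Bool.or_eq_true, ih]
    constructor
    · rintro (h | ⟨j, h⟩)
      · exact ⟨0, h⟩
      · exact ⟨j + 1, h⟩
    · rintro ⟨j, h⟩
      cases j with
      | zero => exact Or.inl h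
      | succ k => exact Or.inr ⟨k, h⟩

theorem pv_a_iff (s : String) :
    has_interactive_components_any s = true ↔
      ∃ suf ∈ pvSuffixes, PySem.Chars.isIn ("<mono-".toList ++ suf) s.toList = true := by
  simp only [has_interactive_components_any, pvSuffixes, List.any_eq_true, List.mem_cons,
    List.not_mem_nil, or_false, PySem.Str.isIn_eq]
  constructor
  · rintro ⟨tag, htag, h⟩
    rcases htag with rfl | rfl | rfl | rfl | rfl | rfl | rfl <;>
      [exact ⟨_, Or.inl rfl, h⟩; exact ⟨_, Or.inr (Or.inl rfl), h⟩;
       exact ⟨_, Or.inr (Or.inr (Or.inl rfl)), h⟩;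
       exact ⟨_, Or.inr (Or.inr (Or.inr (Or.inl rfl))), h⟩;
       exact ⟨_, Or.inr (Or.inr (Or.inr (Or.inr (Or.inl rfl)))), h⟩;
       exact ⟨_, Or.inr (Or.inr (Or.inr (Or.inr (Or.inr (Or.inl rfl))))), h⟩;
       exact ⟨_, Or.inr (Or.inr (Or.inr (Or.inr (Or.inr (Or.inr rfl))))), h⟩]
  · rintro ⟨suf, hsuf, h⟩
    rcases hsuf with rfl | rfl | rfl | rfl | rfl | rfl | rfl <;>
      [exact ⟨_, Or.inl rfl, h⟩; exact ⟨_, Or.inr (Or.inl rfl), h⟩;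
       exact ⟨_, Or.inr (Or.inr (Or.inl rfl)), h⟩;
       exact ⟨_, Or.inr (Or.inr (Or.inr (Or.inl rfl))), h⟩;
       exact ⟨_, Or.inr (Or.inr (Or.inr (Or.inr (Or.inl rfl)))), h⟩;
       exact ⟨_, Or.inr (Or.inr (Or.inr (Or.inr (Or.inr (Or.inl rfl))))), h⟩;
       exact ⟨_, Or.inr (Or.inr (Or.inr (Or.inr (Or.inr (Or.inr rfl))))), h⟩]

theorem pv_main (s : String) :
    has_interactive_components_any s = has_interactive_components_any_alt s := by
  have hb : has_interactive_components_any_alt s = true ↔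
      ∃ suf ∈ pvSuffixes, PySem.Chars.isIn ("<mono-".toList ++ suf) s.toList = true := by
    simp only [has_interactive_components_any_alt, pv_scan_iff, pv_hit_iff]
    constructor
    · rintro ⟨j, suf, hsuf, h⟩
      exact ⟨suf, hsuf, (PySem.Chars.exists_prefix_drop_iff_isIn _ _).1 ⟨j, h⟩⟩
    · rintro ⟨suf, hsuf, h⟩
      obtain ⟨j, hj⟩ := (PySem.Chars.exists_prefix_drop_iff_isIn _ _).2 h
      exact ⟨j, suf, hsuf, hj⟩
  have := (pv_a_iff s).trans hb.symm
  cases ha : has_interactive_components_any s <;> cases hb' : has_interactive_components_any_alt s <;>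
    simp_all

-- ===== VERDICT (by name: the statement is the Claim_ definition above) =====
theorem has_interactive_components_any_spec : Claim_equal_has_interactive_components_any := by
  intro s _
  unfold Spec_has_interactive_components_any
  exact pv_main s
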